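-- pv_equiv track=rewrite | github.com/ipaljak-tbtl/advent-of-code | 2023/krupic/14/sol1.py | solve
-- ===== SOURCE A (Python) =====
-- def solve(col):
--     l = len(col)
--     load = 0
--     lowest_empty = 0
--     for i, tile in enumerate(col):
--         if tile == 'O':
--             load += l - lowest_empty
--             lowest_empty += 1
--         elif tile == '#':
--             lowest_empty = i + 1
--     return load
-- ===== SOURCE B (Python) =====
-- def solve(col):
--     tiles = list(col)
--     l = len(tiles)
--     segments = []
--     i = 0
--     while i < l:
--         k = 0
--         j = i
--         while j < l and tiles[j] != '#':
--             if tiles[j] == 'O':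
--                 k += 1
--             j += 1
--         segments.append((i, k))
--         i = j + 1
--     return sum(k * l - k * s - k * (k - 1) // 2 for (s, k) in segments)
-- ===== Notes on version B (the rewrite author's own statement) =====
-- stated objective: alternative
-- what changed: B first splits the column into maximal '#'-separated segments recording each segment's start and rock count, then sums each segment's load by the closed form k*l - k*s - k*(k-1)//2, instead of A's single per-rock pass with a running lowest_empty.
import Mathlib
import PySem

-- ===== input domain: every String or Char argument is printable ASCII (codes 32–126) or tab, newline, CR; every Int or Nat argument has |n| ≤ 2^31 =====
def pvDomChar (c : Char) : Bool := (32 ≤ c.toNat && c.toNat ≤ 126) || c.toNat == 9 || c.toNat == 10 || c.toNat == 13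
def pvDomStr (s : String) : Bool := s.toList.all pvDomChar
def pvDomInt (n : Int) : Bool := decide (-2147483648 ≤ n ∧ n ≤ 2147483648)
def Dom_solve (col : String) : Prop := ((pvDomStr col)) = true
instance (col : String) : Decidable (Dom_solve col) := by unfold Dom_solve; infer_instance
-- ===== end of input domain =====

-- B splits the column into '#'-separated segments (start, rock count) first and then
-- sums each segment's closed-form load, instead of A's per-rock running accumulation.

-- ===== PORT A =====
def solve (col : String) : Int :=
  let l : Int := PySem.Str.len col
  let st := (PySem.List.enumerate col.toList).foldl
    (fun (s : Int × Int) it =>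
      if it.2 = 'O' then (s.1 + l - s.2, s.2 + 1)
      else if it.2 = '#' then (s.1, it.1 + 1)
      else s) (0, 0)
  st.1

-- ===== PORT B =====
-- inner while loop of Source B: scan one maximal '#'-free segment,
-- returning (rock count, number of tiles consumed incl. the '#', remaining tiles)
def scanSeg : List Char → Int × Int × List Char
  | [] => (0, 0, [])
  | c :: cs =>
      if c = '#' then (0, 1, cs)
      else
        let t := scanSeg cs
        ((if c = 'O' then t.1 + 1 else t.1), t.2.1 + 1, t.2.2)

-- termination helper for segs
theorem scanSeg_rest_le (xs : List Char) : (scanSeg xs).2.2.length ≤ xs.length := by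
  induction xs with
  | nil => simp [scanSeg]
  | cons c cs ih =>
    by_cases h : c = '#'
    · simp [scanSeg, h]
    · simp [scanSeg, h]
      omega

-- outer while loop of Source B: the segment list as (start index, rock count) pairs
def segs (i : Int) (xs : List Char) : List (Int × Int) :=
  match xs with
  | [] => []
  | c :: cs =>
      let t := scanSeg (c :: cs)
      (i, t.1) :: segs (i + t.2.1) t.2.2
termination_by xs.length
decreasing_by
  · simp only [scanSeg]
    by_cases h : c = '#'
    · simp [h]
    · simp [h]
      exact scanSeg_rest_le cs

def solve_alt (col : String) : Int :=
  let l : Int := PySem.Str.len col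
  ((segs 0 col.toList).map
    (fun p => p.2 * l - p.2 * p.1 - PySem.Int.floordiv (p.2 * (p.2 - 1)) 2)).sum

-- ===== PRECONDITION & SPEC =====
def Spec_solve (col : String) (out : Int) : Prop := out = solve_alt col
instance (col : String) (out : Int) : Decidable (Spec_solve col out) := by unfold Spec_solve; infer_instance

-- ===== CLAIM (what is proved, stated in full; the proofs are below) =====
def Claim_equal_solve : Prop := ∀ (col : String), Dom_solve col → Spec_solve col (solve col)

-- ===== LEMMAS AND PROOFS =====

-- segment load closed form (proof-side abbreviation)
def pvF (l s k : Int) : Int := k * l - k * s - PySem.Int.floordiv (k * (k - 1)) 2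

theorem pvF_zero (l s : Int) : pvF l s 0 = 0 := by
  simp [pvF, PySem.Int.floordiv]

-- twice the triangular term is k*(k-1) (the product is even)
theorem pv_tri (k : Int) : 2 * PySem.Int.floordiv (k * (k - 1)) 2 = k * (k - 1) := by
  have h : Even ((k - 1) * ((k - 1) + 1)) := Int.even_mul_succ_self (k - 1)
  obtain ⟨t, ht⟩ := h
  have hk : k * (k - 1) = 2 * t := by ring_nf; ring_nf at ht; omega
  rw [hk]; simp [PySem.Int.floordiv]

theorem pvF_step (l le k : Int) : l - le + pvF l (le + 1) k = pvF l le (k + 1) := by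
  unfold pvF
  have h1 := pv_tri k
  have h2 := pv_tri (k + 1)
  nlinarith [h1, h2]

def pvSum (l : Int) (L : List (Int × Int)) : Int :=
  (L.map (fun p => p.2 * l - p.2 * p.1 - PySem.Int.floordiv (p.2 * (p.2 - 1)) 2)).sum

theorem pvSum_segs (l : Int) (cs : List Char) (j : Int) :
    pvSum l (segs j cs)
      = pvF l j (scanSeg cs).1 + pvSum l (segs (j + (scanSeg cs).2.1) (scanSeg cs).2.2) := by
  cases cs with
  | nil => simp [segs, scanSeg, pvSum, pvF_zero]
  | cons c cs' => rw [segs]; simp [pvSum, pvF]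

-- main invariant: A's fold from enumerate offset j with state (load, le) equals
-- load plus the current segment's closed form at le plus the remaining segments' sum
theorem pv_main (l : Int) (xs : List Char) (j load le : Int) :
    ((PySem.List.enumerate xs j).foldl
      (fun (s : Int × Int) it =>
        if it.2 = 'O' then (s.1 + l - s.2, s.2 + 1)
        else if it.2 = '#' then (s.1, it.1 + 1)
        else s) (load, le)).1
    = load + pvF l le (scanSeg xs).1
        + pvSum l (segs (j + (scanSeg xs).2.1) (scanSeg xs).2.2) := by
  induction xs generalizing j load le with
  | nil => simp [PySem.List.enumerate_nil, scanSeg, segs, pvSum, pvF_zero]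
  | cons c cs ih =>
    rw [PySem.List.enumerate_cons, List.foldl_cons]
    by_cases hO : c = 'O'
    · subst hO
      have hscan : scanSeg ('O' :: cs)
          = ((scanSeg cs).1 + 1, (scanSeg cs).2.1 + 1, (scanSeg cs).2.2) := by
        simp [scanSeg]
      have hstep : (if ('O':Char) = 'O' then (load + l - le, le + 1)
          else if ('O':Char) = '#' then (load, j + 1) else (load, le))
          = (load + l - le, le + 1) := by simp
      rw [hstep, hscan, ih (j + 1) (load + l - le) (le + 1)]
      have hF := pvF_step l le (scanSeg cs).1
      have harg : j + 1 + (scanSeg cs).2.1 = j + ((scanSeg cs).2.1 + 1) := by ring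
      rw [harg]
      simp only []
      linarith
    · by_cases hH : c = '#'
      · subst hH
        have hscan : scanSeg ('#' :: cs) = (0, 1, cs) := by simp [scanSeg]
        have hstep : (if ('#':Char) = 'O' then (load + l - le, le + 1)
            else if ('#':Char) = '#' then (load, j + 1) else (load, le))
            = (load, j + 1) := by simp
        rw [hstep, hscan, ih (j + 1) load (j + 1), pvSum_segs l cs (j + 1), pvF_zero]
        ring_nf
      · have hscan : scanSeg (c :: cs)
            = ((scanSeg cs).1, (scanSeg cs).2.1 + 1, (scanSeg cs).2.2) := by
          simp [scanSeg, hH, hO]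
        have hstep : (if c = 'O' then (load + l - le, le + 1)
            else if c = '#' then (load, j + 1) else (load, le))
            = (load, le) := by simp [hO, hH]
        rw [hstep, hscan, ih (j + 1) load le]
        have harg : j + 1 + (scanSeg cs).2.1 = j + ((scanSeg cs).2.1 + 1) := by ring
        rw [harg]

-- ===== VERDICT (by name: the statement is the Claim_ definition above) =====
theorem solve_spec : Claim_equal_solve := by
  intro col _
  unfold Spec_solve solve solve_alt
  have h := pv_main (PySem.Str.len col) col.toList 0 0 0
  rw [h]
  have h2 := pvSum_segs (PySem.Str.len col) col.toList 0
  simp only [pvSum] at h2 ⊢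
  rw [h2]
  simp [pvF, zero_add]
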